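-- pv_equiv track=rewrite | github.com/c-host/bagh | tools/gnc/gnc_verb_sort_and_filter/populate_verbs_json.py | select_version_forms
-- ===== SOURCE A (Python) =====
-- def select_version_forms(forms_data, version_preference, version_priority):
--     """Select forms based on version preference and priority."""
--     if not forms_data:
--         return []
--
--     # If Non-Version is preferred or in priority, filter to Non-Version only
--     if version_preference == "Non-Version" or "Non-Version" in version_priority:
--         # Only return forms that are actually Non-Version
--         non_version_forms = [
--             f
--             for f in forms_data
--             if f.get("parsed_features", {}).get("version") == "Non-Version"
--         ]
--         if non_version_forms:
--             return non_version_forms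
--         # If no Non-Version forms found, return empty list
--         return []
--
--     # Try preferred version first
--     preferred_forms = [
--         f
--         for f in forms_data
--         if f.get("parsed_features", {}).get("version") == version_preference
--     ]
--     if preferred_forms:
--         return preferred_forms
--
--     # Try version priority order
--     for version in version_priority:
--         version_forms = [
--             f
--             for f in forms_data
--             if f.get("parsed_features", {}).get("version") == version
--         ]
--         if version_forms:
--             return version_forms
--
--     # Default to all forms if no version matches
--     return forms_data
-- ===== SOURCE B (Python) =====
-- def select_version_forms(forms_data, version_preference, version_priority):
--     """Select forms based on version preference and priority.
--
--     Single pass: rank each candidate version once, then scan the forms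
--     keeping the bucket of forms with the minimal rank seen so far."""
--     if version_preference == "Non-Version" or "Non-Version" in version_priority:
--         candidates, default = ["Non-Version"], []
--     else:
--         candidates, default = [version_preference] + list(version_priority), forms_data
--     rank = {}
--     for i, v in enumerate(candidates):
--         if v not in rank:
--             rank[v] = i
--     k = len(candidates)
--     best, bucket = k, []
--     for f in forms_data:
--         r = rank.get(f.get("parsed_features", {}).get("version"), k)
--         if r < best:
--             best, bucket = r, [f]
--         elif r == best and r < k:
--             bucket.append(f)
--     return bucket if best < k else default
-- ===== Notes on version B (the rewrite author's own statement) =====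
-- stated objective: faster
-- what changed: Replaces A's staged whole-list filter passes (one filter per candidate version until one is non-empty) with ranking the candidate versions once in a dict and a single scan of the forms that keeps the bucket of forms with the minimal rank seen so far.
import Mathlib
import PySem

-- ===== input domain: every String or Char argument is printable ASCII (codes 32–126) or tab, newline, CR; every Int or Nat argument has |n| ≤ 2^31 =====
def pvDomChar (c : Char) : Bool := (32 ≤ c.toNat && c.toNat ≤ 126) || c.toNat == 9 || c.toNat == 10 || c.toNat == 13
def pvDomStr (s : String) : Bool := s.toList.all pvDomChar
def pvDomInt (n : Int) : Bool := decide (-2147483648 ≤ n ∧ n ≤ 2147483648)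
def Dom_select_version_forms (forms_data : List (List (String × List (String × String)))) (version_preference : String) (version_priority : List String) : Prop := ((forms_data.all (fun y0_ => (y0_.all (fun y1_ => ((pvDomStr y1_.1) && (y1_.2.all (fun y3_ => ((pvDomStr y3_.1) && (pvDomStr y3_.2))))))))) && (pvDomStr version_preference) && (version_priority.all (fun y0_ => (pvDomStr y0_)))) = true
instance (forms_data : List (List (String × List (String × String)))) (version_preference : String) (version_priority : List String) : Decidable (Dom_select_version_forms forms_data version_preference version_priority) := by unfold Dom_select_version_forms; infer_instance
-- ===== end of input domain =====

-- B replaces A's staged whole-list filter passes (one per candidate version) by ranking the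
-- candidate versions once and doing ONE scan of the forms that keeps the minimal-rank bucket;
-- objective: faster.

abbrev SvfForm := List (String × List (String × String))

-- ===== PORT A =====
-- f.get("parsed_features", {}).get("version")  (shared by both Pythons verbatim)
def svfKey (f : SvfForm) : Option String :=
  PySem.Dict.get? (PySem.Dict.mk (PySem.Dict.getD (PySem.Dict.mk f) "parsed_features" [])) "version"

-- [f for f in forms_data if f.get("parsed_features", {}).get("version") == v]
def svfFilter (forms : List SvfForm) (v : String) : List SvfForm :=
  forms.filter (fun f => svfKey f == some v)

-- A's "for version in version_priority" loop (fallback: return forms_data)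
def svfLoopA (forms : List SvfForm) : List String → List SvfForm
  | [] => forms
  | v :: rest =>
      let version_forms := svfFilter forms v
      if version_forms ≠ [] then version_forms else svfLoopA forms rest

def select_version_forms (forms_data : List (List (String × List (String × String)))) (version_preference : String) (version_priority : List String) : List (List (String × List (String × String))) :=
  if forms_data = [] then []
  else if version_preference = "Non-Version" ∨ version_priority.contains "Non-Version" then
    let non_version_forms := svfFilter forms_data "Non-Version"
    if non_version_forms ≠ [] then non_version_forms else []
  else
    let preferred_forms := svfFilter forms_data version_preference
    if preferred_forms ≠ [] then preferred_forms
    else svfLoopA forms_data version_priority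

-- ===== PORT B =====
-- rank = {}; for i, v in enumerate(candidates): if v not in rank: rank[v] = i
def svfRank (cs : List String) : PySem.Dict String Int :=
  (PySem.List.enumerate cs 0).foldl
    (fun d p => if d.contains p.2 then d else d.insert p.2 p.1) PySem.Dict.empty

-- the body of B's single scan: r = rank.get(version(f), k); update (best, bucket)
def svfStep (rank : PySem.Dict String Int) (k : Int)
    (st : Int × List SvfForm) (f : SvfForm) : Int × List SvfForm :=
  let r := match svfKey f with
           | some s => rank.getD s k
           | none => k        -- rank.get(None, k): None is never a key of rank
  if r < st.1 then (r, [f])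
  else if r = st.1 ∧ r < k then (st.1, st.2 ++ [f])
  else st

def select_version_forms_alt (forms_data : List (List (String × List (String × String)))) (version_preference : String) (version_priority : List String) : List (List (String × List (String × String))) :=
  let cd : List String × List SvfForm :=
    if version_preference = "Non-Version" ∨ version_priority.contains "Non-Version"
    then (["Non-Version"], [])
    else (version_preference :: version_priority, forms_data)
  let rank := svfRank cd.1
  let k : Int := cd.1.length
  let st := forms_data.foldl (svfStep rank k) (k, [])
  if st.1 < k then st.2 else cd.2

-- ===== PRECONDITION & SPEC =====
def Spec_select_version_forms (forms_data : List (List (String × List (String × String)))) (version_preference : String) (version_priority : List String) (out : List (List (String × List (String × String)))) : Prop := out = select_version_forms_alt forms_data version_preference version_priority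
instance (forms_data : List (List (String × List (String × String)))) (version_preference : String) (version_priority : List String) (out : List (List (String × List (String × String)))) : Decidable (Spec_select_version_forms forms_data version_preference version_priority out) := by unfold Spec_select_version_forms; infer_instance

-- ===== CLAIM =====
def Claim_equal_select_version_forms : Prop := ∀ (forms_data : List (List (String × List (String × String)))) (version_preference : String) (version_priority : List String), Dom_select_version_forms forms_data version_preference version_priority → Spec_select_version_forms forms_data version_preference version_priority (select_version_forms forms_data version_preference version_priority)

-- ===== LEMMAS AND PROOFS =====

-- proof-side rank of a form: first index of its version in the candidate list, |cs| if absent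
def svfRk (cs : List String) (f : SvfForm) : Int :=
  match svfKey f with
  | some s => match cs.idxOf? s with
              | some i => (i : Int)
              | none => (cs.length : Int)
  | none => (cs.length : Int)

-- proof-side minimum rank over the forms
def svfM (cs : List String) (l : List SvfForm) : Int :=
  l.foldl (fun b f => min b (svfRk cs f)) (cs.length : Int)

-- A's search generalized over the default (the ladder both branches of A climb)
def svfSearch (forms : List SvfForm) (d : List SvfForm) : List String → List SvfForm
  | [] => d
  | v :: rest =>
      if svfFilter forms v ≠ [] then svfFilter forms v else svfSearch forms d rest

theorem svfLoopA_eq_search (forms : List SvfForm) (l : List String) :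
    svfLoopA forms l = svfSearch forms forms l := by
  induction l with
  | nil => rfl
  | cons v rest ih => simp only [svfLoopA, svfSearch, ih]

-- the rank dict's lookup is the FIRST index of the version in the candidate list
theorem svfRank_fold_get? (cs : List String) (s : String) :
    ∀ (n : Int) (d : PySem.Dict String Int),
      ((PySem.List.enumerate cs n).foldl
        (fun d p => if d.contains p.2 then d else d.insert p.2 p.1) d).get? s
      = (d.get? s).or ((cs.idxOf? s).map (fun i => (i : Int) + n)) := by
  induction cs with
  | nil => intro n d; simp [PySem.List.enumerate_nil]
  | cons v cs ih =>
      intro n d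
      rw [PySem.List.enumerate_cons, List.foldl_cons]
      by_cases hc : (d.contains v : Bool)
      · simp only [hc, if_true, ih]
        by_cases hsv : s = v
        · subst hsv
          have hs : (d.get? s).isSome := by
            rw [← PySem.Dict.contains_eq_isSome_get?]; exact hc
          obtain ⟨w, hw⟩ := Option.isSome_iff_exists.mp hs
          simp [hw]
        · simp only [← PySem.List.index?_eq_idxOf?]
          rw [PySem.List.index?_cons_of_ne _ (Ne.symm hsv)]
          cases h : PySem.List.index? cs s <;> simp [h, Option.or] <;> (try cases d.get? s) <;>
            simp <;> push_cast <;> ring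
      · simp only [hc, Bool.false_eq_true, if_false, ih]
        by_cases hsv : s = v
        · subst hsv
          have hnone : d.get? s = none := by
            have := PySem.Dict.contains_eq_isSome_get? (d := d) (k := s)
            rw [this] at hc
            cases h : d.get? s <;> simp [h] at hc ⊢
          rw [PySem.Dict.get?_insert_self]
          simp only [← PySem.List.index?_eq_idxOf?]
          rw [PySem.List.index?_cons_self]
          simp [hnone]
        · rw [PySem.Dict.get?_insert_of_ne _ _ hsv]
          simp only [← PySem.List.index?_eq_idxOf?]
          rw [PySem.List.index?_cons_of_ne _ (Ne.symm hsv)]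
          cases h : PySem.List.index? cs s <;> simp [h, Option.or] <;> (try cases d.get? s) <;>
            simp <;> push_cast <;> ring

theorem svfRank_get? (cs : List String) (s : String) :
    (svfRank cs).get? s = (cs.idxOf? s).map (fun i => (i : Int)) := by
  rw [svfRank, svfRank_fold_get?]
  simp [PySem.Dict.get?_empty, Option.or]

-- B's scan body computes min-rank with its bucket
theorem svfStep_eq (cs : List String) :
    svfStep (svfRank cs) (cs.length : Int)
      = fun st f => (if svfRk cs f < st.1 then ((svfRk cs f), [f])
                     else if svfRk cs f = st.1 ∧ svfRk cs f < (cs.length : Int) then (st.1, st.2 ++ [f])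
                     else st) := by
  funext st f
  unfold svfStep svfRk
  cases hk : svfKey f with
  | none => rfl
  | some sv =>
      cases h : cs.idxOf? sv <;>
        simp [PySem.Dict.getD_eq_get?_getD, svfRank_get?, h]

theorem svfRk_nonneg (cs : List String) (f : SvfForm) : 0 ≤ svfRk cs f := by
  unfold svfRk
  cases svfKey f with
  | none => positivity
  | some sv => cases h : cs.idxOf? sv <;> simp [h] <;> positivity

theorem svfRk_le (cs : List String) (f : SvfForm) : svfRk cs f ≤ (cs.length : Int) := by
  unfold svfRk
  cases svfKey f with
  | none => simp
  | some sv =>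
      cases h : cs.idxOf? sv with
      | none => simp [h]
      | some i =>
          have hi : PySem.List.index? cs sv = some i := by
            rw [PySem.List.index?_eq_idxOf?]; exact h
          obtain ⟨hk, -, -⟩ := PySem.List.getElem_of_index?_eq_some hi
          simp only [h]
          exact_mod_cast le_of_lt hk

theorem svfFoldMin_le_init (cs : List String) (l : List SvfForm) :
    ∀ (init : Int), l.foldl (fun b f => min b (svfRk cs f)) init ≤ init := by
  induction l with
  | nil => intro init; simp
  | cons f l ih =>
      intro init
      calc l.foldl (fun b f => min b (svfRk cs f)) (min init (svfRk cs f))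
          ≤ min init (svfRk cs f) := ih _
        _ ≤ init := min_le_left _ _

theorem svfFoldMin_nonneg (cs : List String) (l : List SvfForm) :
    ∀ (init : Int), 0 ≤ init → 0 ≤ l.foldl (fun b f => min b (svfRk cs f)) init := by
  induction l with
  | nil => intro init h; simpa
  | cons f l ih =>
      intro init h
      exact ih _ (le_min h (svfRk_nonneg cs f))

theorem svfFoldMin_le_mem (cs : List String) (l : List SvfForm) :
    ∀ (init : Int) (g : SvfForm), g ∈ l →
      l.foldl (fun b f => min b (svfRk cs f)) init ≤ svfRk cs g := by
  induction l with
  | nil => intro _ _ h; cases h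
  | cons f l ih =>
      intro init g hg
      rcases List.mem_cons.mp hg with h | h
      · subst h
        calc l.foldl (fun b f => min b (svfRk cs f)) (min init (svfRk cs g))
            ≤ min init (svfRk cs g) := svfFoldMin_le_init cs l _
          _ ≤ svfRk cs g := min_le_right _ _
      · exact ih _ g h

theorem svfFoldMin_succ (v : String) (cs : List String) (l : List SvfForm) :
    ∀ (a : Int), (∀ g ∈ l, svfRk (v :: cs) g = svfRk cs g + 1) →
      l.foldl (fun b g => min b (svfRk (v :: cs) g)) (a + 1)
      = l.foldl (fun b g => min b (svfRk cs g)) a + 1 := by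
  induction l with
  | nil => intro a _; simp
  | cons f l ih =>
      intro a h
      simp only [List.foldl_cons]
      rw [h f List.mem_cons_self,
          show min (a + 1) (svfRk cs f + 1) = min a (svfRk cs f) + 1 by omega,
          ih _ (fun g hg => h g (List.mem_cons_of_mem f hg))]

theorem svfM_append (cs : List String) (l : List SvfForm) (f : SvfForm) :
    svfM cs (l ++ [f]) = min (svfM cs l) (svfRk cs f) := by
  simp [svfM, List.foldl_append]

theorem svfM_le_len (cs : List String) (l : List SvfForm) : svfM cs l ≤ (cs.length : Int) := by
  exact svfFoldMin_le_init cs l _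

theorem svfM_nonneg (cs : List String) (l : List SvfForm) : 0 ≤ svfM cs l := by
  exact svfFoldMin_nonneg cs l _ (by positivity)

theorem svfM_le_mem (cs : List String) (l : List SvfForm) (g : SvfForm) (hg : g ∈ l) :
    svfM cs l ≤ svfRk cs g := by
  exact svfFoldMin_le_mem cs l _ g hg

-- the scan invariant: B's fold returns the minimum rank and its bucket
theorem svfScan_eq (cs : List String) (l : List SvfForm) :
    l.foldl (svfStep (svfRank cs) (cs.length : Int)) ((cs.length : Int), [])
      = (svfM cs l,
         if svfM cs l < (cs.length : Int)
         then l.filter (fun f => svfRk cs f == svfM cs l) else []) := by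
  rw [svfStep_eq]
  induction l using List.reverseRecOn with
  | nil => simp [svfM]
  | append_singleton l f ih =>
      rw [List.foldl_append, ih, List.foldl_cons, List.foldl_nil, svfM_append]
      have hble := svfM_le_len cs l
      have hrle := svfRk_le cs f
      rcases lt_trichotomy (svfRk cs f) (svfM cs l) with h | h | h
      · have hrk : svfRk cs f < (cs.length : Int) := lt_of_lt_of_le h hble
        have hmin : min (svfM cs l) (svfRk cs f) = svfRk cs f := min_eq_right (le_of_lt h)
        have hfil : l.filter (fun g => svfRk cs g == svfRk cs f) = [] := by
          rw [List.filter_eq_nil_iff]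
          intro g hg
          have hge := svfM_le_mem cs l g hg
          simp only [beq_iff_eq]
          omega
        simp only [if_pos h, hmin, if_pos hrk, List.filter_append]
        simp [hfil]
      · by_cases hk : svfM cs l < (cs.length : Int)
        · have hcond : svfRk cs f = (svfM cs l, if svfM cs l < (cs.length : Int)
              then l.filter (fun g => svfRk cs g == svfM cs l) else []).1 ∧
              svfRk cs f < (cs.length : Int) := ⟨h, by omega⟩
          have hmin : min (svfM cs l) (svfRk cs f) = svfM cs l := min_eq_left (le_of_eq h.symm)
          simp only [if_neg (by simp [h] : ¬ svfRk cs f < (svfM cs l, if svfM cs l < (cs.length : Int)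
              then l.filter (fun g => svfRk cs g == svfM cs l) else []).1), if_pos hcond, hmin,
            if_pos hk, List.filter_append]
          simp [h, hk]
        · have hmin : min (svfM cs l) (svfRk cs f) = svfM cs l := min_eq_left (le_of_eq h.symm)
          simp only [hmin]
          have : ¬ (svfRk cs f < svfM cs l) := by omega
          have h2 : ¬ (svfRk cs f = svfM cs l ∧ svfRk cs f < (cs.length : Int)) := by
            rintro ⟨he, hl⟩; omega
          simp [this, h2, hk]
      · have hmin : min (svfM cs l) (svfRk cs f) = svfM cs l := min_eq_left (le_of_lt h)
        have h1 : ¬ (svfRk cs f < svfM cs l) := by omega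
        have h2 : ¬ (svfRk cs f = svfM cs l ∧ svfRk cs f < (cs.length : Int)) := by
          rintro ⟨he, hl⟩; omega
        have hne : (svfRk cs f == svfM cs l) = false := by
          simp only [beq_eq_false_iff_ne, ne_eq]; omega
        simp only [hmin, List.filter_append]
        simp [h1, h2, hne]

-- rank through a cons of the candidate list
theorem svfRk_cons (v : String) (cs : List String) (f : SvfForm) :
    svfRk (v :: cs) f = if svfKey f = some v then 0 else svfRk cs f + 1 := by
  unfold svfRk
  cases hk : svfKey f with
  | none =>
      rw [if_neg (by simp : ¬ (Option.none (α := String) = some v))]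
      simp only [List.length_cons]
      push_cast
      ring
  | some s =>
      by_cases hsv : s = v
      · subst hsv
        simp only [← PySem.List.index?_eq_idxOf?]
        rw [PySem.List.index?_cons_self]
        simp
      · simp only [← PySem.List.index?_eq_idxOf?]
        rw [PySem.List.index?_cons_of_ne _ (Ne.symm hsv)]
        have hne : ¬ (some s = some v) := by simpa using hsv
        rw [if_neg hne]
        cases h : PySem.List.index? cs s <;> simp [h] <;> push_cast <;> ring

-- the bridge: A's sequential search is the min-rank bucket (or the default)
theorem svfSearch_eq (forms : List SvfForm) (d : List SvfForm) (cs : List String) :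
    svfSearch forms d cs
      = if svfM cs forms < (cs.length : Int)
        then forms.filter (fun f => svfRk cs f == svfM cs forms) else d := by
  induction cs with
  | nil =>
      have := svfM_nonneg [] forms
      rw [svfSearch, if_neg (by simpa using not_lt.mpr this)]
  | cons v cs ih =>
      by_cases hf : svfFilter forms v ≠ []
      · obtain ⟨f, hfmem, hfkey⟩ : ∃ f ∈ forms, (svfKey f == some v) = true := by
          by_contra hcon
          push_neg at hcon
          exact hf (List.filter_eq_nil_iff.mpr (by simpa using hcon))
        have hkey : svfKey f = some v := by simpa using hfkey
        have h0 : svfRk (v :: cs) f = 0 := by rw [svfRk_cons, if_pos hkey]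
        have hm0 : svfM (v :: cs) forms = 0 :=
          le_antisymm (h0 ▸ svfM_le_mem (v :: cs) forms f hfmem) (svfM_nonneg _ _)
        have hk0 : (0 : Int) < ((v :: cs).length : Int) := by
          simp only [List.length_cons]; positivity
        have hfe : svfFilter forms v
            = forms.filter (fun g => svfRk (v :: cs) g == (0 : Int)) := by
          apply List.filter_congr
          intro g hg
          rw [svfRk_cons]
          by_cases hgv : svfKey g = some v
          · simp [hgv]
          · have : svfRk cs g + 1 ≠ 0 := by have := svfRk_nonneg cs g; omega
            simp [hgv, this]
        rw [svfSearch, if_pos hf, hm0, if_pos hk0, ← hfe]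
      · push_neg at hf
        have hall : ∀ g ∈ forms, ¬ svfKey g = some v := by
          intro g hg
          have := List.filter_eq_nil_iff.mp hf g hg
          simpa using this
        have hrk1 : ∀ g ∈ forms, svfRk (v :: cs) g = svfRk cs g + 1 := by
          intro g hg
          rw [svfRk_cons, if_neg (hall g hg)]
        have hm1 : svfM (v :: cs) forms = svfM cs forms + 1 := by
          unfold svfM
          have hlen : (((v :: cs).length : Nat) : Int) = (cs.length : Int) + 1 := by
            simp only [List.length_cons]; push_cast; ring
          rw [hlen]
          exact svfFoldMin_succ v cs forms _ hrk1
        rw [svfSearch, if_neg (by simpa using hf), ih, hm1]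
        have hiff : (svfM cs forms + 1 < ((v :: cs).length : Int))
            ↔ (svfM cs forms < (cs.length : Int)) := by
          simp only [List.length_cons]
          push_cast
          omega
        have hfe : forms.filter (fun g => svfRk (v :: cs) g == svfM cs forms + 1)
            = forms.filter (fun g => svfRk cs g == svfM cs forms) := by
          apply List.filter_congr
          intro g hg
          rw [hrk1 g hg]
          by_cases he : svfRk cs g = svfM cs forms
          · simp [he]
          · have : svfRk cs g + 1 ≠ svfM cs forms + 1 := by omega
            simp [he, this]
        rw [hfe]
        by_cases hm : svfM cs forms < (cs.length : Int)
        · rw [if_pos hm, if_pos (hiff.mpr hm)]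
        · rw [if_neg hm, if_neg (fun hcon => hm (hiff.mp hcon))]

theorem svfSearch_nil (d : List SvfForm) (cs : List String) :
    svfSearch [] d cs = d := by
  induction cs with
  | nil => rfl
  | cons v rest ih => simp [svfSearch, svfFilter, ih]

-- A's whole body is the generalized search (default [] in the Non-Version branch, forms otherwise)
theorem svfA_eq (forms : List SvfForm) (pref : String) (prio : List String) :
    select_version_forms forms pref prio
      = if pref = "Non-Version" ∨ prio.contains "Non-Version"
        then svfSearch forms [] ["Non-Version"]
        else svfSearch forms forms (pref :: prio) := by
  unfold select_version_forms
  by_cases hempty : forms = []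
  · subst hempty; simp [svfSearch_nil]
  · rw [if_neg hempty]
    by_cases hnv : pref = "Non-Version" ∨ prio.contains "Non-Version"
    · simp only [hnv, if_true]
      simp [svfSearch]
    · simp only [hnv, if_false]
      simp [svfSearch, svfLoopA_eq_search]

-- B's whole body is the same generalized search
theorem svfB_eq (forms : List SvfForm) (pref : String) (prio : List String) :
    select_version_forms_alt forms pref prio
      = if pref = "Non-Version" ∨ prio.contains "Non-Version"
        then svfSearch forms [] ["Non-Version"]
        else svfSearch forms forms (pref :: prio) := by
  unfold select_version_forms_alt
  by_cases hnv : pref = "Non-Version" ∨ prio.contains "Non-Version" <;>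
    simp only [hnv, if_true, if_false] <;>
    rw [svfScan_eq, svfSearch_eq] <;> split <;> simp_all

-- ===== VERDICT =====
theorem select_version_forms_spec : Claim_equal_select_version_forms := by
  intro forms_data version_preference version_priority _
  unfold Spec_select_version_forms
  rw [svfA_eq, svfB_eq]
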